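-- pv_equiv track=rewrite | github.com/lysanderl-glitch/synapse | scripts/ai_risk_warning.py | get_flow_for_task
-- ===== SOURCE A (Python) =====
-- PARALLEL_FLOWS = {
--     "P-EX1": {"name": "项目管理主线", "prefixes": ["S", "DA", "DP", "DO", "DC", "DT", "DU", "DV"]},
--     "P-EX2": {"name": "软件部署", "prefixes": ["DD"]},
--     "P-EX3": {"name": "静态数字化", "prefixes": ["DS"]},
--     "P-EX4": {"name": "动态数字化", "prefixes": ["DY"]},
--     "P-EX5": {"name": "业务调研→RCC→初始化", "prefixes": ["DB", "DR", "DI"]},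
--     "P-EX6": {"name": "外立面视觉", "prefixes": ["DS007", "DS008"]},
-- }
--
-- def get_flow_for_task(wbs_code):
--     """判定任务所属的并行执行流"""
--     # P-EX6 用精确前缀匹配（DS007/DS008优先于DS）
--     for flow_id, flow_def in sorted(PARALLEL_FLOWS.items(),
--                                      key=lambda x: -max(len(p) for p in x[1]["prefixes"])):
--         for prefix in flow_def["prefixes"]:
--             if wbs_code == prefix:
--                 return flow_id
--             if wbs_code.startswith(prefix) and (
--                 len(wbs_code) == len(prefix)
--                 or not wbs_code[len(prefix):][0].isalpha()
--                 or wbs_code[len(prefix):][0].islower()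
--             ):
--                 return flow_id
--     return None
-- ===== SOURCE B (Python) =====
-- PARALLEL_FLOWS = {
--     "P-EX1": {"name": "项目管理主线", "prefixes": ["S", "DA", "DP", "DO", "DC", "DT", "DU", "DV"]},
--     "P-EX2": {"name": "软件部署", "prefixes": ["DD"]},
--     "P-EX3": {"name": "静态数字化", "prefixes": ["DS"]},
--     "P-EX4": {"name": "动态数字化", "prefixes": ["DY"]},
--     "P-EX5": {"name": "业务调研→RCC→初始化", "prefixes": ["DB", "DR", "DI"]},
--     "P-EX6": {"name": "外立面视觉", "prefixes": ["DS007", "DS008"]},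
-- }
--
-- # one flat (prefix, flow_id) table, longest prefixes first (stable), built once
-- _PREFIX_TABLE = sorted(
--     ((prefix, flow_id)
--      for flow_id, flow_def in PARALLEL_FLOWS.items()
--      for prefix in flow_def["prefixes"]),
--     key=lambda t: -len(t[0]),
-- )
--
-- def get_flow_for_task(wbs_code):
--     """判定任务所属的并行执行流"""
--     for prefix, flow_id in _PREFIX_TABLE:
--         if wbs_code.startswith(prefix):
--             rest = wbs_code[len(prefix):]
--             if not rest or not rest[0].isalpha() or rest[0].islower():
--                 return flow_id
--     return None
-- ===== Notes on version B (the rewrite author's own statement) =====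
-- stated objective: simpler
-- what changed: Replaces A's per-call sort of flows by max prefix length followed by a nested flows-then-prefixes scan with a single flat (prefix, flow_id) table precomputed once, stably sorted by descending prefix length, scanned in one pass.
import Mathlib
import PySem

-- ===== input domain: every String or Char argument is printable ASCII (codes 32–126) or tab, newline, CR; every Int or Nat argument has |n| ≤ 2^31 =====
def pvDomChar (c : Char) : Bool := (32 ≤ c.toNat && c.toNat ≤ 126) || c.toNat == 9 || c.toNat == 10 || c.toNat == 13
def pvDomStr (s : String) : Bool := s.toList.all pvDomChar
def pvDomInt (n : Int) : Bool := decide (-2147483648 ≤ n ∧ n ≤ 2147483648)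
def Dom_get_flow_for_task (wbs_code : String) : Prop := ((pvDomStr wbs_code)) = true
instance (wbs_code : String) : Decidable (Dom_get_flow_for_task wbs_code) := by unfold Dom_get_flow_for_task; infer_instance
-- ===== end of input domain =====

-- B replaces A's sort-flows-then-scan-prefixes nested traversal by one precomputed flat
-- (prefix, flow_id) table sorted once by descending prefix length and scanned in a single pass
-- (objective: simpler single-loop lookup; same observable behaviour).

-- ===== PORT A =====
-- PARALLEL_FLOWS as an association list (flow_id, (name, prefixes)), insertion order
def pvPARALLEL_FLOWS : List (String × String × List String) :=
  [ ("P-EX1", "项目管理主线", ["S", "DA", "DP", "DO", "DC", "DT", "DU", "DV"]),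
    ("P-EX2", "软件部署", ["DD"]),
    ("P-EX3", "静态数字化", ["DS"]),
    ("P-EX4", "动态数字化", ["DY"]),
    ("P-EX5", "业务调研→RCC→初始化", ["DB", "DR", "DI"]),
    ("P-EX6", "外立面视觉", ["DS007", "DS008"]) ]

-- key=lambda x: -max(len(p) for p in x[1]["prefixes"])
def pvKeyA (x : String × String × List String) : Int :=
  match PySem.List.max? (x.2.2.map (fun p => PySem.Str.len p)) (fun v => v) with
  | some m => -m
  | none => 0   -- unreachable: Python's max would raise on an empty prefixes list; none here is empty

-- the second if's condition, step for step (the `none` branches are unreachable: Python reaches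
-- wbs_code[len(prefix):][0] only when startswith holds and the lengths differ, so the slice is nonempty)
def pvACond2 (wbs p : String) : Bool :=
  PySem.Str.startswith wbs p &&
    ( (PySem.Str.len wbs == PySem.Str.len p)
      || (match PySem.Str.pyGet? (PySem.Str.slice wbs (some (PySem.Str.len p)) none) 0 with
          | some c => !(PySem.Chars.isalpha c)
          | none => false)
      || (match PySem.Str.pyGet? (PySem.Str.slice wbs (some (PySem.Str.len p)) none) 0 with
          | some c => PySem.Chars.islower c
          | none => false) )

-- inner `for prefix in flow_def["prefixes"]`
def pvAInner (wbs fid : String) : List String → Option String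
  | [] => none
  | p :: ps =>
    if wbs == p then some fid
    else if pvACond2 wbs p then some fid
    else pvAInner wbs fid ps

-- outer `for flow_id, flow_def in sorted(...)`
def pvAOuter (wbs : String) : List (String × String × List String) → Option String
  | [] => none
  | f :: fs =>
    match pvAInner wbs f.1 f.2.2 with
    | some r => some r
    | none => pvAOuter wbs fs

def get_flow_for_task (wbs_code : String) : Option String :=
  pvAOuter wbs_code (PySem.List.sorted pvPARALLEL_FLOWS pvKeyA false)

-- ===== PORT B =====
-- _PREFIX_TABLE = sorted(((prefix, flow_id) ...), key=lambda t: -len(t[0]))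
def pvPrefixTable : List (String × String) :=
  PySem.List.sorted
    (pvPARALLEL_FLOWS.flatMap (fun f => f.2.2.map (fun p => (p, f.1))))
    (fun t => -(PySem.Str.len t.1)) false

-- `not rest or not rest[0].isalpha() or rest[0].islower()` (rest[0] reached only when rest ≠ "")
def pvBInner (wbs p : String) : Bool :=
  let rest := PySem.Str.slice wbs (some (PySem.Str.len p)) none
  (PySem.Str.len rest == 0)
  || (match PySem.Str.pyGet? rest 0 with
      | some c => !(PySem.Chars.isalpha c) || PySem.Chars.islower c
      | none => false)

def pvBScan (wbs : String) : List (String × String) → Option String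
  | [] => none
  | (p, fid) :: rest =>
    if PySem.Str.startswith wbs p then
      if pvBInner wbs p then some fid else pvBScan wbs rest
    else pvBScan wbs rest

def get_flow_for_task_alt (wbs_code : String) : Option String :=
  pvBScan wbs_code pvPrefixTable

-- ===== PRECONDITION & SPEC =====
def Spec_get_flow_for_task (wbs_code : String) (out : Option String) : Prop := out = get_flow_for_task_alt wbs_code
instance (wbs_code : String) (out : Option String) : Decidable (Spec_get_flow_for_task wbs_code out) := by unfold Spec_get_flow_for_task; infer_instance

-- ===== CLAIM (what is proved, stated in full; the proofs are below) =====
def Claim_equal_get_flow_for_task : Prop := ∀ (wbs_code : String), Dom_get_flow_for_task wbs_code → Spec_get_flow_for_task wbs_code (get_flow_for_task wbs_code)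

-- ===== LEMMAS AND PROOFS =====

-- flattened prefix sequence of A (after its sort), and B's table split around ("S","P-EX1")
def pvL1 : List (String × String) := [("DS007", "P-EX6"), ("DS008", "P-EX6")]
def pvSP : String × String := ("S", "P-EX1")
def pvL2 : List (String × String) :=
  [("DA", "P-EX1"), ("DP", "P-EX1"), ("DO", "P-EX1"), ("DC", "P-EX1"), ("DT", "P-EX1"),
   ("DU", "P-EX1"), ("DV", "P-EX1"), ("DD", "P-EX2"), ("DS", "P-EX3"), ("DY", "P-EX4"),
   ("DB", "P-EX5"), ("DR", "P-EX5"), ("DI", "P-EX5")]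

theorem pvSortA_eq :
    (PySem.List.sorted pvPARALLEL_FLOWS pvKeyA false).flatMap (fun f => f.2.2.map (fun p => (p, f.1)))
      = pvL1 ++ pvSP :: pvL2 := by decide

theorem pvTable_eq : pvPrefixTable = pvL1 ++ (pvL2 ++ [pvSP]) := by decide

-- startswith s s = true
theorem pv_sw_refl (s : String) : PySem.Str.startswith s s = true := by
  rw [PySem.Str.startswith_eq, PySem.Chars.startswith_iff]

-- A's combined per-prefix condition equals B's
set_option maxRecDepth 4096 in
theorem pv_cond_eq (w p : String) :
    ((w == p) || pvACond2 w p) = (PySem.Str.startswith w p && pvBInner w p) := by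
  by_cases hsw : PySem.Str.startswith w p = true
  · have hp : p.toList <+: w.toList := by
      rw [PySem.Str.startswith_eq, PySem.Chars.startswith_iff] at hsw; exact hsw
    have hlen : p.toList.length ≤ w.toList.length := hp.length_le
    have hrest : (PySem.Str.slice w (some (PySem.Str.len p)) none).toList
        = w.toList.drop p.toList.length := by
      rw [PySem.Str.len_eq]
      rw [show (PySem.Str.slice w (some ((p.toList.length : Int))) none).toList
            = PySem.List.slice w.toList (some ((p.toList.length : Int))) none from by
        simp [PySem.Str.toList_slice]]
      exact PySem.List.slice_from_natCast _ _
    have heqiff : (w == p) = (PySem.Str.len w == PySem.Str.len p) := by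
      by_cases he : w = p
      · subst he; rw [beq_self_eq_true, beq_self_eq_true]
      · have hne : (w == p) = false := by simp [he]
        by_cases hl : w.toList.length = p.toList.length
        · exact absurd (String.ext (List.IsPrefix.eq_of_length hp hl.symm)).symm he
        · rw [hne]
          symm
          simp only [PySem.Str.len_eq, beq_eq_false_iff_ne, ne_eq, Int.natCast_inj]
          exact hl
    have hlen0 : (PySem.Str.len (PySem.Str.slice w (some (PySem.Str.len p)) none) == 0)
        = (PySem.Str.len w == PySem.Str.len p) := by
      have hr : PySem.Str.len (PySem.Str.slice w (some (PySem.Str.len p)) none)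
          = ((w.toList.length - p.toList.length : Nat) : Int) := by
        rw [PySem.Str.len_eq, hrest, List.length_drop]
      by_cases hl : w.toList.length = p.toList.length
      · have hA : (((w.toList.length - p.toList.length : Nat) : Int) == 0) = true :=
          beq_iff_eq.mpr (by omega)
        have hB : (PySem.Str.len w == PySem.Str.len p) = true := by
          rw [PySem.Str.len_eq, PySem.Str.len_eq]
          exact beq_iff_eq.mpr (by exact_mod_cast hl)
        rw [hr, hA, hB]
      · have hA : (((w.toList.length - p.toList.length : Nat) : Int) == 0) = false :=
          beq_eq_false_iff_ne.mpr (by omega)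
        have hB : (PySem.Str.len w == PySem.Str.len p) = false := by
          rw [PySem.Str.len_eq, PySem.Str.len_eq]
          exact beq_eq_false_iff_ne.mpr (by simp only [ne_eq, Int.natCast_inj]; exact hl)
        rw [hr, hA, hB]
    simp only [pvACond2, pvBInner, hsw, Bool.true_and, hlen0, heqiff]
    cases hg : PySem.Str.pyGet? (PySem.Str.slice w (some (PySem.Str.len p)) none) 0 with
    | none =>
      -- empty rest: then the lengths are equal and the disjunction collapses to that disjunct
      have hnil : w.toList.drop p.toList.length = [] := by
        have hg' := hg
        rw [show (0 : Int) = ((0 : Nat) : Int) from rfl, PySem.Str.pyGet?_natCast] at hg'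
        cases hd : (PySem.Str.slice w (some (PySem.Str.len p)) none).toList with
        | nil => rw [← hrest]; exact hd
        | cons a t => rw [hd] at hg'; simp at hg'
      have hle : (PySem.Str.len w == PySem.Str.len p) = true := by
        have hd := List.drop_eq_nil_iff.mp hnil
        simp only [PySem.Str.len_eq, beq_iff_eq, Int.natCast_inj]
        omega
      rw [hle]
      rfl
    | some c =>
      cases (PySem.Str.len w == PySem.Str.len p) <;>
        cases PySem.Chars.isalpha c <;> cases PySem.Chars.islower c <;> rfl
  · have hne : (w == p) = false := by
      by_cases he : w = p
      · subst he; exact absurd (pv_sw_refl w) hsw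
      · simp [he]
    have hsw'' : PySem.Chars.startswith w.toList p.toList = false := by
      rw [← PySem.Str.startswith_eq]
      cases h : PySem.Str.startswith w p
      · rfl
      · exact absurd h hsw
    simp [pvACond2, hne, hsw'']

-- collapsing the two-if shapes to a single boolean test
theorem pvAInner_eq_scan (w fid : String) (ps : List String) :
    pvAInner w fid ps = pvBScan w (ps.map (fun p => (p, fid))) := by
  induction ps with
  | nil => rfl
  | cons p ps ih =>
    simp only [pvAInner, List.map, pvBScan, ih]
    have h := pv_cond_eq w p
    cases h1 : (w == p) <;> cases h2 : pvACond2 w p <;>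
      rw [h1, h2] at h <;>
      cases h3 : PySem.Str.startswith w p <;> rw [h3] at h <;>
      cases h4 : pvBInner w p <;> rw [h4] at h <;> simp_all

theorem pvBScan_append (w : String) (xs ys : List (String × String)) :
    pvBScan w (xs ++ ys) = match pvBScan w xs with
                           | some r => some r
                           | none => pvBScan w ys := by
  induction xs with
  | nil => simp [pvBScan]
  | cons x xs ih =>
    obtain ⟨p, fid⟩ := x
    simp only [List.cons_append, pvBScan, ih]
    split_ifs <;> rfl

theorem pvAOuter_eq_scan (w : String) (fs : List (String × String × List String)) :
    pvAOuter w fs = pvBScan w (fs.flatMap (fun f => f.2.2.map (fun p => (p, f.1)))) := by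
  induction fs with
  | nil => rfl
  | cons f fs ih =>
    simp only [pvAOuter, List.flatMap_cons, pvBScan_append, ← pvAInner_eq_scan, ih]

-- a prefix whose first char differs from the word's first char never matches
theorem pv_sw_false (wl : List Char) (c d : Char) (u t : List Char)
    (hw : wl = c :: u) (hne : d ≠ c) :
    PySem.Chars.startswith wl (d :: t) = false := by
  cases h : PySem.Chars.startswith wl (d :: t)
  · rfl
  · rw [PySem.Chars.startswith_iff, hw, List.cons_prefix_cons] at h
    exact absurd h.1 hne

theorem pvScan_L2_none (w : String) (c : Char) (u : List Char) (hw : w.toList = c :: u)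
    (hc : c = 'S') : pvBScan w pvL2 = none := by
  subst hc
  have h1 := pv_sw_false w.toList 'S' 'D' u ['A'] hw (by decide)
  have h2 := pv_sw_false w.toList 'S' 'D' u ['P'] hw (by decide)
  have h3 := pv_sw_false w.toList 'S' 'D' u ['O'] hw (by decide)
  have h4 := pv_sw_false w.toList 'S' 'D' u ['C'] hw (by decide)
  have h5 := pv_sw_false w.toList 'S' 'D' u ['T'] hw (by decide)
  have h6 := pv_sw_false w.toList 'S' 'D' u ['U'] hw (by decide)
  have h7 := pv_sw_false w.toList 'S' 'D' u ['V'] hw (by decide)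
  have h8 := pv_sw_false w.toList 'S' 'D' u ['D'] hw (by decide)
  have h9 := pv_sw_false w.toList 'S' 'D' u ['S'] hw (by decide)
  have h10 := pv_sw_false w.toList 'S' 'D' u ['Y'] hw (by decide)
  have h11 := pv_sw_false w.toList 'S' 'D' u ['B'] hw (by decide)
  have h12 := pv_sw_false w.toList 'S' 'D' u ['R'] hw (by decide)
  have h13 := pv_sw_false w.toList 'S' 'D' u ['I'] hw (by decide)
  simp [pvL2, pvBScan, h1, h2, h3, h4, h5, h6, h7, h8, h9, h10, h11, h12, h13]

theorem pvScan_move_S (w : String) :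
    pvBScan w (pvSP :: pvL2) = pvBScan w (pvL2 ++ [pvSP]) := by
  by_cases hs : PySem.Str.startswith w "S" = true
  · have hw : ∃ u, w.toList = 'S' :: u := by
      rw [PySem.Str.startswith_eq, PySem.Chars.startswith_iff] at hs
      obtain ⟨t, ht⟩ := hs
      exact ⟨t, by simpa using ht.symm⟩
    obtain ⟨u, hw⟩ := hw
    have h2 := pvScan_L2_none w 'S' u hw rfl
    rw [pvBScan_append, h2]
    show pvBScan w (pvSP :: pvL2) = pvBScan w [pvSP]
    simp only [pvSP, pvBScan, hs, if_true, h2]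
  · have hs' : PySem.Str.startswith w "S" = false := by
      cases h : PySem.Str.startswith w "S"
      · rfl
      · exact absurd h hs
    rw [pvBScan_append]
    show pvBScan w (pvSP :: pvL2) = _
    simp only [pvSP, pvBScan, hs']
    cases h : pvBScan w pvL2 <;> rfl

-- ===== VERDICT (by name: the statement is the Claim_ definition above) =====
theorem get_flow_for_task_spec : Claim_equal_get_flow_for_task := by
  intro w _
  show get_flow_for_task w = get_flow_for_task_alt w
  rw [get_flow_for_task, get_flow_for_task_alt, pvAOuter_eq_scan, pvSortA_eq, pvTable_eq]
  rw [pvBScan_append, pvBScan_append, pvScan_move_S, pvBScan_append]
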